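-- pv_equiv track=rewrite | github.com/justinschmitz97/WebToGPT | data/summarize.py | combine_paragraphs
-- ===== SOURCE A (Python) =====
-- def combine_paragraphs(contents):
--     combined_content = []
--     current_paragraph = []
--
--     for item in contents:
--         if item["type"] == "p":
--             current_paragraph.append(item["text"])
--         else:
--             if current_paragraph:
--                 combined_content.append(
--                     {"type": "p", "text": " ".join(current_paragraph)}
--                 )
--                 current_paragraph = []
--             combined_content.append(item)
--
--     # If there's any paragraph left at the end, add it
--     if current_paragraph:
--         combined_content.append({"type": "p", "text": " ".join(current_paragraph)})
--
--     return combined_content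
-- ===== SOURCE B (Python) =====
-- from itertools import groupby
--
-- def combine_paragraphs(contents):
--     result = []
--     for is_p, group in groupby(contents, key=lambda item: item["type"] == "p"):
--         if is_p:
--             result.append({"type": "p", "text": " ".join(i["text"] for i in group)})
--         else:
--             result.extend(group)
--     return result
-- ===== Notes on version B (the rewrite author's own statement) =====
-- stated objective: idiomatic
-- what changed: Replaces the running paragraph buffer with a trailing flush by itertools.groupby on whether the item is a paragraph: each True group becomes one joined paragraph, each False group is emitted unchanged.
import Mathlib
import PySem

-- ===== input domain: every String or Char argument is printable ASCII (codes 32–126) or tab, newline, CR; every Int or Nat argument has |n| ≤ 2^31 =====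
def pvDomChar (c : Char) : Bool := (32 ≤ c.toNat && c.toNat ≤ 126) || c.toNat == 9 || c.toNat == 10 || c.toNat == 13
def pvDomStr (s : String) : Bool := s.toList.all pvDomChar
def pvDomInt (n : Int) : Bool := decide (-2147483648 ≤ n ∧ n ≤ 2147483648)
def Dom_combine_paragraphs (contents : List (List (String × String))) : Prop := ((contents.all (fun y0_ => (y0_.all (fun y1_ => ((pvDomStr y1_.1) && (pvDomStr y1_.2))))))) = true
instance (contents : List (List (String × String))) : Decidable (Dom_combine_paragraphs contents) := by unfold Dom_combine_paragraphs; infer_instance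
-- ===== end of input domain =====

-- B replaces A's running buffer + trailing flush by grouping consecutive paragraph items and joining each group (idiomatic groupby decomposition).

-- ===== PORT A =====
-- item["type"] == "p"  (dict lookup = first match; Pre_ guarantees the key is present, so the "" default is never used)
def pvIsP (item : List (String × String)) : Bool :=
  (PySem.Dict.mk item).getD "type" "" == "p"
-- item["text"]  (Pre_ guarantees presence when pvIsP holds)
def pvText (item : List (String × String)) : String :=
  (PySem.Dict.mk item).getD "text" ""
-- {"type": "p", "text": t}
def pvMkP (t : String) : List (String × String) := [("type", "p"), ("text", t)]

-- the for-loop, state = (combined_content, current_paragraph)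
def combine_paragraphs_step (st : List (List (String × String)) × List String)
    (item : List (String × String)) : List (List (String × String)) × List String :=
  if pvIsP item then (st.1, st.2 ++ [pvText item])
  else
    (if st.2 ≠ [] then st.1 ++ [pvMkP (PySem.Str.join " " st.2)] ++ [item]
     else st.1 ++ [item], [])

def combine_paragraphs (contents : List (List (String × String))) : List (List (String × String)) :=
  let st := contents.foldl combine_paragraphs_step ([], [])
  if st.2 ≠ [] then st.1 ++ [pvMkP (PySem.Str.join " " st.2)] else st.1

-- ===== PORT B =====
-- groupby(contents, key = item["type"]=="p"): a True run becomes one joined paragraph, a False run is emitted unchanged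
def combine_paragraphs_alt (contents : List (List (String × String))) : List (List (String × String)) :=
  match contents with
  | [] => []
  | x :: xs =>
    if pvIsP x then
      pvMkP (PySem.Str.join " " (pvText x :: (xs.takeWhile pvIsP).map pvText))
        :: combine_paragraphs_alt (xs.dropWhile pvIsP)
    else x :: combine_paragraphs_alt xs
termination_by contents.length
decreasing_by
  · simpa using Nat.lt_succ_of_le (List.length_dropWhile_le pvIsP xs)
  · simp

-- ===== PRECONDITION & SPEC =====
-- A raises KeyError when an item lacks "type", or is a paragraph lacking "text"; exactly those inputs are excluded.
def Pre_combine_paragraphs (contents : List (List (String × String))) : Prop :=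
  ∀ item ∈ contents, (PySem.Dict.mk item).contains "type" = true ∧
    (pvIsP item = true → (PySem.Dict.mk item).contains "text" = true)
instance (contents : List (List (String × String))) : Decidable (Pre_combine_paragraphs contents) := by
  unfold Pre_combine_paragraphs; infer_instance
def pvWitness_combine_paragraphs : (List (List (String × String))) :=
  [[("type", "p"), ("text", "a")], [("type", "h1"), ("text", "t")], [("type", "p"), ("text", "b")]]

def Spec_combine_paragraphs (contents : List (List (String × String))) (out : List (List (String × String))) : Prop := out = combine_paragraphs_alt contents
instance (contents : List (List (String × String))) (out : List (List (String × String))) : Decidable (Spec_combine_paragraphs contents out) := by unfold Spec_combine_paragraphs; infer_instance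

-- ===== CLAIM (what is proved, stated in full; the proofs are below) =====
def Claim_equal_combine_paragraphs : Prop := ∀ (contents : List (List (String × String))), Dom_combine_paragraphs contents → Pre_combine_paragraphs contents → Spec_combine_paragraphs contents (combine_paragraphs contents)

-- ===== LEMMAS AND PROOFS =====

-- what A's loop + final flush computes from state (acc, cur), written recursively
def pvAux (cur : List String) : List (List (String × String)) → List (List (String × String))
  | [] => if cur ≠ [] then [pvMkP (PySem.Str.join " " cur)] else []
  | x :: xs =>
    if pvIsP x then pvAux (cur ++ [pvText x]) xs
    else (if cur ≠ [] then [pvMkP (PySem.Str.join " " cur)] else []) ++ x :: pvAux [] xs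

lemma pvAux_eq_foldl (l : List (List (String × String)))
    (acc : List (List (String × String))) (cur : List String) :
    (let st := l.foldl combine_paragraphs_step (acc, cur);
     if st.2 ≠ [] then st.1 ++ [pvMkP (PySem.Str.join " " st.2)] else st.1)
      = acc ++ pvAux cur l := by
  induction l generalizing acc cur with
  | nil => simp [pvAux]; split <;> simp
  | cons x xs ih =>
    simp only [List.foldl_cons, combine_paragraphs_step, pvAux]
    by_cases hp : pvIsP x
    · simp [hp, ih]
    · by_cases hc : cur = [] <;> simp [hp, hc, ih]

lemma pvAux_spec : ∀ (l : List (List (String × String))) (cur : List String),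
    (cur = [] → pvAux cur l = combine_paragraphs_alt l) ∧
    (cur ≠ [] → pvAux cur l =
      pvMkP (PySem.Str.join " " (cur ++ (l.takeWhile pvIsP).map pvText))
        :: combine_paragraphs_alt (l.dropWhile pvIsP)) := by
  intro l
  induction l with
  | nil =>
    intro cur
    constructor
    · intro h; simp [h, pvAux, combine_paragraphs_alt]
    · intro h; simp [pvAux, h, combine_paragraphs_alt]
  | cons x xs ih =>
    intro cur
    by_cases hp : pvIsP x
    · constructor
      · intro h
        subst h
        have := (ih [pvText x]).2 (by simp)
        simp only [pvAux, hp, if_pos, List.nil_append] at this ⊢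
        rw [this, combine_paragraphs_alt]
        simp [hp]
      · intro h
        have := (ih (cur ++ [pvText x])).2 (by simp [h])
        simp only [pvAux, hp, if_pos] at this ⊢
        rw [this]
        simp [hp]
    · constructor
      · intro h
        have := (ih []).1 rfl
        simp only [pvAux, hp, h] at this ⊢
        simp only [this]
        rw [combine_paragraphs_alt]
        simp [hp]
      · intro h
        have := (ih []).1 rfl
        simp only [pvAux, hp] at this ⊢
        simp only [this, List.takeWhile_cons, List.dropWhile_cons, hp]
        conv_rhs => rw [combine_paragraphs_alt.eq_def]
        simp [hp, h]

-- ===== VERDICT (by name: the statement is the Claim_ definition above) =====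
theorem combine_paragraphs_spec : Claim_equal_combine_paragraphs := by
  intro contents _ _
  show combine_paragraphs contents = combine_paragraphs_alt contents
  have h := pvAux_eq_foldl contents [] []
  simp only [List.nil_append] at h
  rw [combine_paragraphs, h, (pvAux_spec contents []).1 rfl]
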